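-- pv_equiv track=rewrite | github.com/Joel-Venzke/TDSE | analysis/target.py | state_name
-- ===== SOURCE A (Python) =====
-- def state_single_name(state_number, shells):
--     # find the n value for this state
--     n_value = 0
--     for n, shell in enumerate(shells):
--         if state_number > shell:
--             n_value = n + 1
--
--     # calculate quantum number l
--     l_value = state_number - shells[n_value - 1]
--
--     # create label
--     if l_value == 1:
--         ret_val = str(n_value) + "s"
--     elif l_value == 2:
--         ret_val = str(n_value) + "p"
--     elif l_value == 3:
--         ret_val = str(n_value) + "d"
--     elif l_value == 4:
--         ret_val = str(n_value) + "f"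
--     elif l_value > 24:  # anything greater that z is just a number
--         ret_val = str(n_value) + ",l=" + str(l_value - 1)
--     else:  # any
--         ret_val = str(n_value) + chr(ord('g') + l_value - 5)
--
--     return ret_val
--
-- def state_name(state_number):
--     # get size of each shell
--     shells = [0]
--     while (state_number > shells[-1]):
--         shells.append(shells[-1] + len(shells))
--
--     # get list of names
--     name_list = []
--     for state in range(1, state_number + 1):
--         name_list.append(state_single_name(state, shells))
--
--     return name_list
-- ===== SOURCE B (Python) =====
-- def _shell_label(n, l):
--     # label for the l-th state (1-based) of shell n
--     if l <= 4:
--         return str(n) + "spdf"[l - 1]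
--     if l > 24:
--         return str(n) + ",l=" + str(l - 1)
--     return str(n) + chr(ord('g') + l - 5)
--
-- def state_name(state_number):
--     # single pass over shells: shell n contributes states T(n-1)+1 .. T(n)
--     names = []
--     n = 1
--     start = 0  # triangular number T(n-1), states already emitted
--     while start < state_number:
--         width = min(n, state_number - start)
--         for l in range(1, width + 1):
--             names.append(_shell_label(n, l))
--         start += n
--         n += 1
--     return names
-- ===== Notes on version B (the rewrite author's own statement) =====
-- stated objective: faster
-- what changed: Instead of building the triangular-number shell list and, for every state, scanning the whole shell list to locate its shell, B makes one pass over the shells and emits each shell's n labels directly.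
import Mathlib
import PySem

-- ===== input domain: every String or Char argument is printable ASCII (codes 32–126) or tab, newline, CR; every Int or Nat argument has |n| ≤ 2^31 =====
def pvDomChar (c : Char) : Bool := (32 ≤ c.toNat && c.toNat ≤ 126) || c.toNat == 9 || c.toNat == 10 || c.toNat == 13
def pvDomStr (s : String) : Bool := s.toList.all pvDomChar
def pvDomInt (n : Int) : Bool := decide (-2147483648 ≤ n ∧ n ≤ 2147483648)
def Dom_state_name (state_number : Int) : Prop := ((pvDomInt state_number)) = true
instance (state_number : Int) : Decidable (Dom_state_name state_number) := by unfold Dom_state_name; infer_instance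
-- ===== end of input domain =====

-- B replaces A's per-state scan of the shell list by a single pass over the shells
-- that emits each shell's labels directly (measured asymptotically faster).

-- ===== PORT A =====
-- shells = [0]; while state_number > shells[-1]: shells.append(shells[-1] + len(shells))
def pvBuildShells (state_number : Int) (shells : List Int) (h : shells ≠ []) : List Int :=
  let last := PySem.List.pyGetD shells (-1) 0   -- shells[-1]; shells is never empty
  if state_number > last then
    pvBuildShells state_number (shells ++ [last + (shells.length : Int)]) (by simp)
  else shells
termination_by (state_number - PySem.List.pyGetD shells (-1) 0).toNat
decreasing_by
  simp only [PySem.List.pyGetD_neg_one_append_singleton]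
  have hlen : 1 ≤ shells.length := List.length_pos_iff.mpr h
  omega

def pvSingleName (state_number : Int) (shells : List Int) : String :=
  -- n_value = 0; for n, shell in enumerate(shells): if state_number > shell: n_value = n + 1
  let n_value := (PySem.List.enumerate shells 0).foldl
    (fun acc p => if state_number > p.2 then p.1 + 1 else acc) 0
  -- l_value = state_number - shells[n_value - 1]  (index always in range where A returns)
  let l_value := state_number - PySem.List.pyGetD shells (n_value - 1) 0
  if l_value = 1 then PySem.Int.toStr n_value ++ "s"
  else if l_value = 2 then PySem.Int.toStr n_value ++ "p"
  else if l_value = 3 then PySem.Int.toStr n_value ++ "d"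
  else if l_value = 4 then PySem.Int.toStr n_value ++ "f"
  else if l_value > 24 then PySem.Int.toStr n_value ++ ",l=" ++ PySem.Int.toStr (l_value - 1)
  -- chr(ord('g') + l_value - 5): exact for 5 ≤ l_value ≤ 24, the only values that reach here
  else PySem.Int.toStr n_value ++ String.mk [Char.ofNat (103 + l_value - 5).toNat]

def state_name (state_number : Int) : List String :=
  let shells := pvBuildShells state_number [0] (by simp)
  (PySem.List.pyRange 1 (state_number + 1) 1).foldl
    (fun acc state => acc ++ [pvSingleName state shells]) []

-- ===== PORT B =====
def pvShellLabel (n l : Int) : String :=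
  if l ≤ 4 then
    -- "spdf"[l - 1]; in B this is only reached with 1 ≤ l ≤ 4
    PySem.Int.toStr n ++ ((PySem.Str.pyGet? "spdf" (l - 1)).map (fun c => String.mk [c])).getD ""
  else if l > 24 then PySem.Int.toStr n ++ ",l=" ++ PySem.Int.toStr (l - 1)
  -- chr(ord('g') + l - 5): exact for 5 ≤ l ≤ 24, the only values that reach here
  else PySem.Int.toStr n ++ String.mk [Char.ofNat (103 + l - 5).toNat]

def pvEmit (state_number : Int) (names : List String) (n start : Int) (hn : 1 ≤ n) : List String :=
  if start < state_number then
    let width := min n (state_number - start)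
    let names' := (PySem.List.pyRange 1 (width + 1) 1).foldl
      (fun acc l => acc ++ [pvShellLabel n l]) names
    pvEmit state_number names' (n + 1) (start + n) (by omega)
  else names
termination_by (state_number - start).toNat
decreasing_by omega

def state_name_alt (state_number : Int) : List String :=
  pvEmit state_number [] 1 0 (by norm_num)

-- ===== PRECONDITION & SPEC =====
def Spec_state_name (state_number : Int) (out : List String) : Prop := out = state_name_alt state_number
instance (state_number : Int) (out : List String) : Decidable (Spec_state_name state_number out) := by unfold Spec_state_name; infer_instance

-- ===== CLAIM (what is proved, stated in full; the proofs are below) =====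
def Claim_equal_state_name : Prop := ∀ (state_number : Int), Dom_state_name state_number → Spec_state_name state_number (state_name state_number)

-- ===== LEMMAS AND PROOFS =====

-- triangular numbers: Tn k = k-th shell boundary (= shells[k] in A)
def Tn : Nat → Int
  | 0 => 0
  | k + 1 => Tn k + (k + 1)

def triL (K : Nat) : List Int := (List.range (K + 1)).map (fun k => Tn k)

theorem Tn_le_Tn {k m : Nat} (h : k ≤ m) : Tn k ≤ Tn m := by
  induction m with
  | zero => interval_cases k; rfl
  | succ m ih =>
    rcases Nat.lt_or_ge k (m + 1) with h' | h'
    · have := ih (by omega); simp [Tn]; omega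
    · have : k = m + 1 := by omega
      simp [this]

theorem le_Tn (k : Nat) : (k : Int) ≤ Tn k := by
  induction k with
  | zero => simp [Tn]
  | succ k ih => simp [Tn]; omega

theorem le_or_lt' (a b : Int) : a ≤ b ∨ b < a := by omega

-- least shell index n with s ≤ Tn n
theorem nv_ex (s : Int) : ∃ n : Nat, s ≤ Tn n := by
  rcases le_or_lt' s 0 with h | h
  · exact ⟨0, by simpa [Tn] using h⟩
  · exact ⟨s.toNat, le_trans (by omega) (le_Tn s.toNat)⟩

def nv (s : Int) : Nat := Nat.find (nv_ex s)

theorem nv_le (s : Int) : s ≤ Tn (nv s) := Nat.find_spec (nv_ex s)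

theorem nv_min {s : Int} {m : Nat} (h : m < nv s) : Tn m < s := by
  have := Nat.find_min (nv_ex s) h
  omega

theorem nv_eq {s : Int} {n : Nat} (hn : 1 ≤ n) (h1 : Tn (n - 1) < s) (h2 : s ≤ Tn n) :
    nv s = n := by
  have hle : nv s ≤ n := Nat.find_le h2
  by_contra hne
  have hlt : nv s < n := by omega
  have : Tn (nv s) ≤ Tn (n - 1) := Tn_le_Tn (by omega)
  have := nv_le s
  omega

theorem nv_pos {s : Int} (hs : 1 ≤ s) : 1 ≤ nv s := by
  by_contra h
  have h0 : nv s = 0 := by omega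
  have := nv_le s
  rw [h0] at this
  simp [Tn] at this
  omega

-- the canonical name of state s (s ≥ 1): shell nv s, offset s - Tn (nv s - 1)
def gname (s : Int) : String := pvShellLabel (nv s) (s - Tn (nv s - 1))

-- ---- facts about triL ----
theorem triL_length (K : Nat) : (triL K).length = K + 1 := by simp [triL]

theorem triL_ne_nil (K : Nat) : triL K ≠ [] := by
  have := triL_length K
  intro h; rw [h] at this; simp at this

theorem triL_getD (K k : Nat) (hk : k < K + 1) : (triL K).getD k 0 = Tn k := by
  simp [triL, List.getD_eq_getElem?_getD, hk]

theorem triL_succ (K : Nat) : triL (K + 1) = triL K ++ [Tn (K + 1)] := by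
  simp [triL, List.range_succ]

theorem pvBuildShells_congr (s : Int) {l1 l2 : List Int} (h : l1 = l2)
    (h1 : l1 ≠ []) (h2 : l2 ≠ []) : pvBuildShells s l1 h1 = pvBuildShells s l2 h2 := by
  subst h; rfl

theorem triL_last (K : Nat) : PySem.List.pyGetD (triL K) (-1) 0 = Tn K := by
  cases K with
  | zero =>
    have h0 : triL 0 = [] ++ [Tn 0] := by simp [triL]
    rw [h0, PySem.List.pyGetD_neg_one_append_singleton]
  | succ K =>
    rw [triL_succ, PySem.List.pyGetD_neg_one_append_singleton]


-- ---- A's shell construction builds a triangular list reaching state_number ----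
theorem build_spec (s : Int) : ∀ (m K : Nat), (s - Tn K).toNat ≤ m →
    ∃ K', pvBuildShells s (triL K) (triL_ne_nil K) = triL K' ∧ s ≤ Tn K' := by
  intro m
  induction m with
  | zero =>
    intro K hK
    have hle : s ≤ Tn K := by omega
    refine ⟨K, ?_, hle⟩
    rw [pvBuildShells]
    simp only [triL_last]
    rw [if_neg (by omega)]
  | succ m ih =>
    intro K hK
    rcases le_or_lt' s (Tn K) with hle | hgt
    · refine ⟨K, ?_, hle⟩
      rw [pvBuildShells]
      simp only [triL_last]
      rw [if_neg (by omega)]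
    · have hstep : triL K ++ [Tn K + ((triL K).length : Int)] = triL (K + 1) := by
        rw [triL_length, triL_succ]
        simp [Tn]
      have hm : (s - Tn (K + 1)).toNat ≤ m := by
        have : Tn K + 1 ≤ Tn (K + 1) := by simp [Tn]
        omega
      obtain ⟨K', h1, h2⟩ := ih (K + 1) hm
      refine ⟨K', ?_, h2⟩
      rw [pvBuildShells]
      simp only [triL_last]
      rw [if_pos hgt, ← h1]
      exact pvBuildShells_congr s hstep _ _
  

-- ---- A's n_value fold over the shell list ----
theorem fold_sat (s : Int) : ∀ K : Nat, Tn K < s →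
    (List.range (K + 1)).foldl (fun acc k => if s > Tn k then (k : Int) + 1 else acc) 0 = (K : Int) + 1 := by
  intro K
  induction K with
  | zero =>
    intro h
    have h0 : List.range (0 + 1) = [0] := rfl
    rw [h0]
    simp only [List.foldl_cons, List.foldl_nil]
    rw [if_pos h]
  | succ K ih =>
    intro h
    rw [List.range_succ, List.foldl_append]
    simp only [List.foldl_cons, List.foldl_nil]
    rw [if_pos h]

theorem fold_nv (s : Int) (hs : 1 ≤ s) : ∀ K : Nat, s ≤ Tn K →
    (List.range (K + 1)).foldl (fun acc k => if s > Tn k then (k : Int) + 1 else acc) 0 = (nv s : Int) := by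
  intro K
  induction K with
  | zero =>
    intro h
    have h0 : Tn 0 = 0 := rfl
    omega
  | succ K ih =>
    intro h
    rw [List.range_succ, List.foldl_append]
    simp only [List.foldl_cons, List.foldl_nil]
    rw [if_neg (by omega)]
    rcases le_or_lt' s (Tn K) with hle | hgt
    · exact ih hle
    · rw [fold_sat s K hgt]
      have hnv : nv s = K + 1 := nv_eq (by omega) (by simpa using hgt) h
      rw [hnv]
      push_cast
      ring

theorem enum_map_range (f : Nat → Int) : ∀ (m a : Nat),
    PySem.List.enumerate ((List.range' a m).map f) (a : Int)
      = (List.range' a m).map (fun k : Nat => ((k : Int), f k)) := by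
  intro m
  induction m with
  | zero => intro a; simp [PySem.List.enumerate_nil]
  | succ m ih =>
    intro a
    rw [List.range'_succ]
    simp only [List.map_cons, PySem.List.enumerate_cons]
    rw [show (a : Int) + 1 = ((a + 1 : Nat) : Int) by push_cast; ring, ih (a + 1)]

theorem enum_triL (K : Nat) :
    PySem.List.enumerate (triL K) 0 = (List.range (K + 1)).map (fun k : Nat => ((k : Int), Tn k)) := by
  have h : triL K = (List.range' 0 (K + 1)).map (fun k => Tn k) := by
    rw [triL, List.range_eq_range']
  rw [h, show (0 : Int) = ((0 : Nat) : Int) from rfl, enum_map_range, List.range_eq_range']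

-- A's label branch chain agrees with B's label helper for every l ≥ 1
theorem label_eq (n l : Int) (hl : 1 ≤ l) :
    (if l = 1 then PySem.Int.toStr n ++ "s"
     else if l = 2 then PySem.Int.toStr n ++ "p"
     else if l = 3 then PySem.Int.toStr n ++ "d"
     else if l = 4 then PySem.Int.toStr n ++ "f"
     else if l > 24 then PySem.Int.toStr n ++ ",l=" ++ PySem.Int.toStr (l - 1)
     else PySem.Int.toStr n ++ String.mk [Char.ofNat (103 + l - 5).toNat])
    = pvShellLabel n l := by
  unfold pvShellLabel
  by_cases h1 : l = 1
  · subst h1; norm_num; rfl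
  by_cases h2 : l = 2
  · subst h2; norm_num; rfl
  by_cases h3 : l = 3
  · subst h3; norm_num; rfl
  by_cases h4 : l = 4
  · subst h4; norm_num; rfl
  rw [if_neg h1, if_neg h2, if_neg h3, if_neg h4, if_neg (show ¬ l ≤ 4 by omega)]

theorem single_eq (K : Nat) (s : Int) (h1 : 1 ≤ s) (h2 : s ≤ Tn K) :
    pvSingleName s (triL K) = gname s := by
  unfold pvSingleName
  rw [enum_triL, List.foldl_map]
  simp only []
  rw [fold_nv s h1 K h2]
  have hnv1 : 1 ≤ nv s := nv_pos h1
  have hnvK : nv s ≤ K := Nat.find_le h2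
  have hidx : ((nv s : Int) - 1) = ((nv s - 1 : Nat) : Int) := by omega
  rw [hidx, PySem.List.pyGetD_natCast, triL_getD K (nv s - 1) (by omega)]
  have hl : 1 ≤ s - Tn (nv s - 1) := by
    have := nv_min (show nv s - 1 < nv s by omega)
    omega
  exact label_eq _ _ hl

-- A's outer loop is the map of gname over 1..N
theorem A_map (N : Int) (K : Nat) (hK : N ≤ Tn K) :
    (PySem.List.pyRange 1 (N + 1) 1).foldl
        (fun acc state => acc ++ [pvSingleName state (triL K)]) []
      = (PySem.List.pyRange 1 (N + 1) 1).map gname := by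
  rw [PySem.List.foldl_append_singleton_eq_map]
  rw [List.nil_append]
  apply List.map_congr_left
  intro s hs
  rw [PySem.List.mem_pyRange_one] at hs
  exact single_eq K s hs.1 (by omega)

theorem Tn_toNat_succ (n : Int) (hn : 1 ≤ n) :
    Tn n.toNat = Tn (n - 1).toNat + n := by
  have h : n.toNat = (n - 1).toNat + 1 := by omega
  rw [h, Tn]
  have : (((n - 1).toNat + 1 : Nat) : Int) = n := by omega
  omega

-- one shell block of B equals gname on the corresponding states
theorem block_eq (n start width : Int) (hn : 1 ≤ n) (hstart : start = Tn (n - 1).toNat)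
    (hwn : width ≤ n) :
    (PySem.List.pyRange 1 (width + 1) 1).map (fun l => pvShellLabel n l)
      = (PySem.List.pyRange (start + 1) (start + width + 1) 1).map gname := by
  rw [PySem.List.pyRange_one 1 (width + 1), PySem.List.pyRange_one (start + 1) (start + width + 1)]
  rw [List.map_map, List.map_map]
  have harg : (start + width + 1 - (start + 1)).toNat = (width + 1 - 1).toNat := by omega
  rw [harg]
  apply List.map_congr_left
  intro k hk
  rw [List.mem_range] at hk
  have hkw : (k : Int) < width := by omega
  simp only [Function.comp_apply]
  have hTn : Tn n.toNat = start + n := by rw [Tn_toNat_succ n hn, hstart]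
  have hnv : nv (start + 1 + k) = n.toNat := by
    apply nv_eq (by omega)
    · have : (n.toNat - 1) = (n - 1).toNat := by omega
      rw [this, ← hstart]
      omega
    · rw [hTn]; omega
  unfold gname
  rw [hnv]
  have hc1 : ((n.toNat : Nat) : Int) = n := by omega
  have hc2 : (n.toNat - 1) = (n - 1).toNat := by omega
  rw [hc1, hc2, ← hstart]
  congr 1
  omega

theorem emit_spec : ∀ (m : Nat) (N n start : Int) (names : List String) (hn : 1 ≤ n),
    start = Tn (n - 1).toNat → (N - start).toNat ≤ m →
    pvEmit N names n start hn = names ++ (PySem.List.pyRange (start + 1) (N + 1) 1).map gname := by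
  intro m
  induction m with
  | zero =>
    intro N n start names hn hstart hm
    rw [pvEmit, if_neg (by omega), PySem.List.pyRange_one_eq_nil (by omega), List.map_nil,
      List.append_nil]
  | succ m ih =>
    intro N n start names hn hstart hm
    by_cases hlt : start < N
    · rw [pvEmit, if_pos hlt]
      simp only [PySem.List.foldl_append_singleton_eq_map]
      rw [ih N (n + 1) (start + n) _ (by omega)
        (by rw [show n + 1 - 1 = n by ring, Tn_toNat_succ n hn, hstart]) (by omega)]
      rw [List.append_assoc]
      congr 1
      have hw1 : (1 : Int) ≤ min n (N - start) := by omega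
      rw [block_eq n start (min n (N - start)) hn hstart (min_le_left _ _)]
      rw [PySem.List.pyRange_one_append (start + 1) (start + min n (N - start) + 1) (N + 1)
        (by omega) (by omega), List.map_append]
      congr 1
      by_cases hwn : min n (N - start) = n
      · rw [hwn]
      · have hw : min n (N - start) = N - start := by omega
        rw [PySem.List.pyRange_one_eq_nil (by omega), PySem.List.pyRange_one_eq_nil (by omega)]
    · rw [pvEmit, if_neg hlt, PySem.List.pyRange_one_eq_nil (by omega), List.map_nil,
        List.append_nil]

-- ===== VERDICT (by name: the statement is the Claim_ definition above) =====
theorem state_name_spec : Claim_equal_state_name := by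
  intro N _
  unfold Spec_state_name state_name state_name_alt
  have h0 : ([0] : List Int) = triL 0 := by simp [triL]; rfl
  obtain ⟨K', hbuild, hle⟩ := build_spec N (N - Tn 0).toNat 0 (le_refl _)
  rw [pvBuildShells_congr N h0 (by simp) (triL_ne_nil 0), hbuild, A_map N K' hle]
  rw [emit_spec N.toNat N 1 0 [] (by norm_num) rfl (by omega)]
  simp
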